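-- pv_equiv track=rewrite | github.com/zb1030415419/PE | Problem_117/117.py | dfs
-- ===== SOURCE A (Python) =====
-- dp=[-1]*55
--
-- def dfs(remain):
--     if remain<0:
--         return 0
--     elif remain==0:
--         return 1
--     elif dp[remain]>=0:
--         return dp[remain]
--     ans=0
--     for i in range(1,5):
--         ans+=dfs(remain-i)
--     dp[remain]=ans
--     return ans
-- ===== SOURCE B (Python) =====
-- def dfs(remain):
--     if remain <= 0:
--         return 1 if remain == 0 else 0
--     f = [1]
--     for r in range(1, remain + 1):
--         f.append(sum(f[max(0, r - 4):r]))
--     return f[remain]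
-- ===== Notes on version B (the rewrite author's own statement) =====
-- stated objective: simpler
-- what changed: Replaces the global-table memoized recursion with a local bottom-up list built in one forward loop (each entry is the sum of the previous up-to-four entries); no global state, no recursion.
import Mathlib
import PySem

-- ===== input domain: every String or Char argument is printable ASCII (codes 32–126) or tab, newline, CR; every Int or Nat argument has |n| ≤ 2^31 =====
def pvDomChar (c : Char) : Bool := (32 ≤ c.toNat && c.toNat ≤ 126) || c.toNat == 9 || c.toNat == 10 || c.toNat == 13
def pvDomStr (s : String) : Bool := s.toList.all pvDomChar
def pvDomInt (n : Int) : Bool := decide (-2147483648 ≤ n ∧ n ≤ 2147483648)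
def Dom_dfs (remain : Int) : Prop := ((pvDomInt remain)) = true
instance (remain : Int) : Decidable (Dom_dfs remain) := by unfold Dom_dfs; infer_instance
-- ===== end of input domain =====

-- B replaces A's global-table memoized recursion with a local bottom-up list (same values).
-- A memoizes in the global list dp (a side effect a caller can observe); the equivalence
-- proved here is about the RETURN value only, and A's port threads a fresh table per call
-- (the cache only ever stores the correct values, so returns are identical).

-- ===== PORT A =====
-- dfsAux fuel remain dp: literal port of A's recursive body; dp is the memo table threaded
-- through the recursion; fuel only makes the recursion structural (depth ≤ remain+1 ≤ 55,
-- so fuel 56 is never exhausted on inputs where A returns).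
def dfsAux : Nat → Int → List Int → List Int × Int
  | 0, _, dp => (dp, 0)  -- fuel exhausted: unreachable under Pre_dfs
  | fuel + 1, remain, dp =>
    if remain < 0 then (dp, 0)
    else if remain = 0 then (dp, 1)
    else
      match PySem.List.pyGet? dp remain with
      | none => (dp, 0)  -- dp[remain] raises IndexError in Python: outside Pre_dfs
      | some v =>
        if v ≥ 0 then (dp, v)
        else
          -- ans = 0; for i in range(1,5): ans += dfs(remain - i)
          let (dp1, a1) := dfsAux fuel (remain - 1) dp
          let (dp2, a2) := dfsAux fuel (remain - 2) dp1
          let (dp3, a3) := dfsAux fuel (remain - 3) dp2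
          let (dp4, a4) := dfsAux fuel (remain - 4) dp3
          let ans := a1 + a2 + a3 + a4
          (dp4.set remain.toNat ans, ans)  -- dp[remain] = ans

def dfs (remain : Int) : Int :=
  (dfsAux 56 remain (List.replicate 55 (-1))).2

-- ===== PORT B =====
def dfs_alt (remain : Int) : Int :=
  if remain ≤ 0 then (if remain = 0 then 1 else 0)
  else
    let f := (PySem.List.pyRange 1 (remain + 1) 1).foldl
      (fun f r => f ++ [(PySem.List.slice f (some (max 0 (r - 4))) (some r)).foldl (· + ·) 0])
      [(1 : Int)]
    (PySem.List.pyGet? f remain).getD 0  -- f[remain]: in range, len f = remain+1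

-- ===== PRECONDITION & SPEC =====
-- Pre_dfs excludes exactly the inputs where A raises IndexError (dp has 55 entries,
-- so dp[remain] raises for remain ≥ 55).
def Pre_dfs (remain : Int) : Prop := remain ≤ 54
instance (remain : Int) : Decidable (Pre_dfs remain) := by unfold Pre_dfs; infer_instance
def pvWitness_dfs : Int := 10


def Spec_dfs (remain : Int) (out : Int) : Prop := out = dfs_alt remain
instance (remain : Int) (out : Int) : Decidable (Spec_dfs remain out) := by unfold Spec_dfs; infer_instance

-- ===== CLAIM (what is proved, stated in full; the proofs are below) =====
def Claim_equal_dfs : Prop := ∀ (remain : Int), Dom_dfs remain → Pre_dfs remain → Spec_dfs remain (dfs remain)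

-- ===== LEMMAS AND PROOFS =====
-- On 0 ≤ remain ≤ 54 the two ports agree: a finite check.
theorem dfs_agree_small : ∀ n : Fin 55, dfs (n : Int) = dfs_alt (n : Int) := by decide

theorem dfs_neg (remain : Int) (h : remain < 0) : dfs remain = 0 := by
  rw [dfs, show (56 : Nat) = 55 + 1 from rfl]
  simp [dfsAux, h]

theorem dfs_alt_neg (remain : Int) (h : remain < 0) : dfs_alt remain = 0 := by
  have h1 : remain ≤ 0 := le_of_lt h
  have h2 : remain ≠ 0 := ne_of_lt h
  simp [dfs_alt, h1, h2]

-- ===== VERDICT (by name: the statement is the Claim_ definition above) =====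
theorem dfs_spec : Claim_equal_dfs := by
  intro remain _ hpre
  unfold Spec_dfs
  rcases lt_or_ge remain 0 with h | h
  · rw [dfs_neg remain h, dfs_alt_neg remain h]
  · have hlt : remain.toNat < 55 := by unfold Pre_dfs at hpre; omega
    have heq : remain = ((remain.toNat : Nat) : Int) := by omega
    rw [heq]
    exact dfs_agree_small ⟨remain.toNat, hlt⟩
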